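-- pv_equiv track=rewrite | github.com/monill1/Resume_Builder | backend/app/ats_semantic_matching.py | _normalize_semantic_token
-- ===== SOURCE A (Python) =====
-- ACTION_ALIASES = {
--     "analyze": {"analyze", "analys", "evaluate", "interpret", "investigate", "measure", "research"},
--     "architect": {"architect", "design", "model", "plan"},
--     "automate": {"automate", "script", "streamline"},
--     "build": {"build", "built", "develop", "deliver", "implement", "create", "ship", "launched", "launch"},
--     "collaborate": {"collaborate", "collaboration", "partner", "communicate", "communication", "coordinate", "work", "align"},
--     "deploy": {"deploy", "release", "publish", "containerize", "orchestrate"},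
--     "lead": {"lead", "led", "own", "owned", "manage", "mentor", "drive"},
--     "maintain": {"maintain", "support", "operate", "monitor", "debug", "troubleshoot"},
--     "optimize": {"optimize", "optimise", "improve", "tune", "reduce", "increase", "scale", "enhance"},
--     "test": {"test", "validate", "verify", "qa"},
-- }
--
-- OBJECT_ALIASES = {
--     "apis": {"api", "apis", "rest", "restful", "endpoint", "endpoints", "service", "services", "backend"},
--     "architecture": {"architecture", "system", "systems", "platform", "scalable", "scale"},
--     "dashboards": {"dashboard", "dashboards", "report", "reports", "reporting", "visualization", "visualisation", "bi"},
--     "data": {"data", "dataset", "datasets", "analytics", "analysis", "insight", "insights"},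
--     "databases": {"database", "databases", "sql", "postgres", "postgresql", "query", "queries", "schema"},
--     "deployment": {"deploy", "deployment", "cloud", "docker", "kubernetes", "ci/cd", "cicd", "pipeline"},
--     "models": {"model", "models", "ml", "machine", "learning", "prediction", "classifier", "nlp"},
--     "performance": {"performance", "latency", "throughput", "speed", "cost", "reliability", "availability"},
--     "pipelines": {"pipeline", "pipelines", "etl", "workflow", "workflows", "airflow", "batch"},
--     "stakeholders": {"stakeholder", "stakeholders", "cross-functional", "business", "partner", "partners", "product", "manager", "managers", "team", "teams", "client", "customer"},
-- }
--
-- def _normalize_semantic_token(token: str) -> str: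
--     for canonical, aliases in ACTION_ALIASES.items():
--         if token in aliases:
--             return canonical
--     for canonical, aliases in OBJECT_ALIASES.items():
--         if token in aliases:
--             return canonical
--     return token
-- ===== SOURCE B (Python) =====
-- # Flat (alias, canonical) table sorted by alias (precedence: ACTION tables before
-- # OBJECT tables, first occurrence wins), looked up by hand-written binary search.
-- _PAIRS = [
--     ('airflow', 'pipelines'),
--     ('align', 'collaborate'),
--     ('analys', 'analyze'),
--     ('analysis', 'data'),
--     ('analytics', 'data'),
--     ('analyze', 'analyze'),
--     ('api', 'apis'),
--     ('apis', 'apis'),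
--     ('architect', 'architect'),
--     ('architecture', 'architecture'),
--     ('automate', 'automate'),
--     ('availability', 'performance'),
--     ('backend', 'apis'),
--     ('batch', 'pipelines'),
--     ('bi', 'dashboards'),
--     ('build', 'build'),
--     ('built', 'build'),
--     ('business', 'stakeholders'),
--     ('ci/cd', 'deployment'),
--     ('cicd', 'deployment'),
--     ('classifier', 'models'),
--     ('client', 'stakeholders'),
--     ('cloud', 'deployment'),
--     ('collaborate', 'collaborate'),
--     ('collaboration', 'collaborate'),
--     ('communicate', 'collaborate'),
--     ('communication', 'collaborate'),
--     ('containerize', 'deploy'),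
--     ('coordinate', 'collaborate'),
--     ('cost', 'performance'),
--     ('create', 'build'),
--     ('cross-functional', 'stakeholders'),
--     ('customer', 'stakeholders'),
--     ('dashboard', 'dashboards'),
--     ('dashboards', 'dashboards'),
--     ('data', 'data'),
--     ('database', 'databases'),
--     ('databases', 'databases'),
--     ('dataset', 'data'),
--     ('datasets', 'data'),
--     ('debug', 'maintain'),
--     ('deliver', 'build'),
--     ('deploy', 'deploy'),
--     ('deployment', 'deployment'),
--     ('design', 'architect'),
--     ('develop', 'build'),
--     ('docker', 'deployment'),
--     ('drive', 'lead'),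
--     ('endpoint', 'apis'),
--     ('endpoints', 'apis'),
--     ('enhance', 'optimize'),
--     ('etl', 'pipelines'),
--     ('evaluate', 'analyze'),
--     ('implement', 'build'),
--     ('improve', 'optimize'),
--     ('increase', 'optimize'),
--     ('insight', 'data'),
--     ('insights', 'data'),
--     ('interpret', 'analyze'),
--     ('investigate', 'analyze'),
--     ('kubernetes', 'deployment'),
--     ('latency', 'performance'),
--     ('launch', 'build'),
--     ('launched', 'build'),
--     ('lead', 'lead'),
--     ('learning', 'models'),
--     ('led', 'lead'),
--     ('machine', 'models'),
--     ('maintain', 'maintain'),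
--     ('manage', 'lead'),
--     ('manager', 'stakeholders'),
--     ('managers', 'stakeholders'),
--     ('measure', 'analyze'),
--     ('mentor', 'lead'),
--     ('ml', 'models'),
--     ('model', 'architect'),
--     ('models', 'models'),
--     ('monitor', 'maintain'),
--     ('nlp', 'models'),
--     ('operate', 'maintain'),
--     ('optimise', 'optimize'),
--     ('optimize', 'optimize'),
--     ('orchestrate', 'deploy'),
--     ('own', 'lead'),
--     ('owned', 'lead'),
--     ('partner', 'collaborate'),
--     ('partners', 'stakeholders'),
--     ('performance', 'performance'),
--     ('pipeline', 'deployment'),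
--     ('pipelines', 'pipelines'),
--     ('plan', 'architect'),
--     ('platform', 'architecture'),
--     ('postgres', 'databases'),
--     ('postgresql', 'databases'),
--     ('prediction', 'models'),
--     ('product', 'stakeholders'),
--     ('publish', 'deploy'),
--     ('qa', 'test'),
--     ('queries', 'databases'),
--     ('query', 'databases'),
--     ('reduce', 'optimize'),
--     ('release', 'deploy'),
--     ('reliability', 'performance'),
--     ('report', 'dashboards'),
--     ('reporting', 'dashboards'),
--     ('reports', 'dashboards'),
--     ('research', 'analyze'),
--     ('rest', 'apis'),
--     ('restful', 'apis'),
--     ('scalable', 'architecture'),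
--     ('scale', 'optimize'),
--     ('schema', 'databases'),
--     ('script', 'automate'),
--     ('service', 'apis'),
--     ('services', 'apis'),
--     ('ship', 'build'),
--     ('speed', 'performance'),
--     ('sql', 'databases'),
--     ('stakeholder', 'stakeholders'),
--     ('stakeholders', 'stakeholders'),
--     ('streamline', 'automate'),
--     ('support', 'maintain'),
--     ('system', 'architecture'),
--     ('systems', 'architecture'),
--     ('team', 'stakeholders'),
--     ('teams', 'stakeholders'),
--     ('test', 'test'),
--     ('throughput', 'performance'),
--     ('troubleshoot', 'maintain'),
--     ('tune', 'optimize'),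
--     ('validate', 'test'),
--     ('verify', 'test'),
--     ('visualisation', 'dashboards'),
--     ('visualization', 'dashboards'),
--     ('work', 'collaborate'),
--     ('workflow', 'pipelines'),
--     ('workflows', 'pipelines'),
-- ]
--
--
-- def _normalize_semantic_token(token: str) -> str:
--     lo, hi = 0, len(_PAIRS)
--     while lo < hi:
--         mid = (lo + hi) // 2
--         key, canonical = _PAIRS[mid]
--         if key == token:
--             return canonical
--         if key < token:
--             lo = mid + 1
--         else:
--             hi = mid
--     return token
-- ===== Notes on version B (the rewrite author's own statement) =====
-- stated objective: alternative
-- what changed: Replaces A's two sequential per-call linear scans over the alias tables with a flat (alias, canonical) table sorted by alias (precedence pre-resolved: ACTION before OBJECT, first occurrence wins) looked up by a hand-written binary search.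
import Mathlib
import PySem

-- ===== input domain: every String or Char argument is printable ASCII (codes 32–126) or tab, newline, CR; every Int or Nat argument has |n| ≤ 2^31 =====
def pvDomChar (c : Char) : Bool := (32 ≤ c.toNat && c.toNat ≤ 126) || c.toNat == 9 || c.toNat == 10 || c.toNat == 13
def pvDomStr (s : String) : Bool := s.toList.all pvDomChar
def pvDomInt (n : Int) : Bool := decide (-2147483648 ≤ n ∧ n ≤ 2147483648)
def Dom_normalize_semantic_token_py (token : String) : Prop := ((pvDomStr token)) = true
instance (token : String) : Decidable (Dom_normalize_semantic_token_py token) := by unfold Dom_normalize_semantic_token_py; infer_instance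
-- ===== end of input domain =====

-- B replaces A's per-call linear scan over both alias tables with a flat alias-sorted
-- literal table looked up by binary search (alternative data structure; same exact values).
set_option maxRecDepth 100000
set_option maxHeartbeats 1000000


-- ===== PORT A =====
-- A's module constants: Python sets held as distinct-element lists in written order
-- (A only tests membership, so set iteration order is irrelevant).
def ACTION_ALIASES : List (String × List String) := [
  ("analyze", ["analyze", "analys", "evaluate", "interpret", "investigate", "measure", "research"]),
  ("architect", ["architect", "design", "model", "plan"]),
  ("automate", ["automate", "script", "streamline"]),
  ("build", ["build", "built", "develop", "deliver", "implement", "create", "ship", "launched", "launch"]),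
  ("collaborate", ["collaborate", "collaboration", "partner", "communicate", "communication", "coordinate", "work", "align"]),
  ("deploy", ["deploy", "release", "publish", "containerize", "orchestrate"]),
  ("lead", ["lead", "led", "own", "owned", "manage", "mentor", "drive"]),
  ("maintain", ["maintain", "support", "operate", "monitor", "debug", "troubleshoot"]),
  ("optimize", ["optimize", "optimise", "improve", "tune", "reduce", "increase", "scale", "enhance"]),
  ("test", ["test", "validate", "verify", "qa"])]

def OBJECT_ALIASES : List (String × List String) := [
  ("apis", ["api", "apis", "rest", "restful", "endpoint", "endpoints", "service", "services", "backend"]),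
  ("architecture", ["architecture", "system", "systems", "platform", "scalable", "scale"]),
  ("dashboards", ["dashboard", "dashboards", "report", "reports", "reporting", "visualization", "visualisation", "bi"]),
  ("data", ["data", "dataset", "datasets", "analytics", "analysis", "insight", "insights"]),
  ("databases", ["database", "databases", "sql", "postgres", "postgresql", "query", "queries", "schema"]),
  ("deployment", ["deploy", "deployment", "cloud", "docker", "kubernetes", "ci/cd", "cicd", "pipeline"]),
  ("models", ["model", "models", "ml", "machine", "learning", "prediction", "classifier", "nlp"]),
  ("performance", ["performance", "latency", "throughput", "speed", "cost", "reliability", "availability"]),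
  ("pipelines", ["pipeline", "pipelines", "etl", "workflow", "workflows", "airflow", "batch"]),
  ("stakeholders", ["stakeholder", "stakeholders", "cross-functional", "business", "partner", "partners", "product", "manager", "managers", "team", "teams", "client", "customer"])]

-- 'for canonical, aliases in T.items(): if token in aliases: return canonical' = first match in the items list
def normalize_semantic_token_py (token : String) : String :=
  match ACTION_ALIASES.find? (fun p => p.2.contains token) with
  | some p => p.1
  | none =>
    match OBJECT_ALIASES.find? (fun p => p.2.contains token) with
    | some p => p.1
    | none => token

-- ===== PORT B =====
-- Source B's literal table: (alias, canonical) pairs sorted by alias, precedence already resolved.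
def PAIRS : Array (String × String) := #[
  ("airflow", "pipelines"),
  ("align", "collaborate"),
  ("analys", "analyze"),
  ("analysis", "data"),
  ("analytics", "data"),
  ("analyze", "analyze"),
  ("api", "apis"),
  ("apis", "apis"),
  ("architect", "architect"),
  ("architecture", "architecture"),
  ("automate", "automate"),
  ("availability", "performance"),
  ("backend", "apis"),
  ("batch", "pipelines"),
  ("bi", "dashboards"),
  ("build", "build"),
  ("built", "build"),
  ("business", "stakeholders"),
  ("ci/cd", "deployment"),
  ("cicd", "deployment"),
  ("classifier", "models"),
  ("client", "stakeholders"),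
  ("cloud", "deployment"),
  ("collaborate", "collaborate"),
  ("collaboration", "collaborate"),
  ("communicate", "collaborate"),
  ("communication", "collaborate"),
  ("containerize", "deploy"),
  ("coordinate", "collaborate"),
  ("cost", "performance"),
  ("create", "build"),
  ("cross-functional", "stakeholders"),
  ("customer", "stakeholders"),
  ("dashboard", "dashboards"),
  ("dashboards", "dashboards"),
  ("data", "data"),
  ("database", "databases"),
  ("databases", "databases"),
  ("dataset", "data"),
  ("datasets", "data"),
  ("debug", "maintain"),
  ("deliver", "build"),
  ("deploy", "deploy"),
  ("deployment", "deployment"),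
  ("design", "architect"),
  ("develop", "build"),
  ("docker", "deployment"),
  ("drive", "lead"),
  ("endpoint", "apis"),
  ("endpoints", "apis"),
  ("enhance", "optimize"),
  ("etl", "pipelines"),
  ("evaluate", "analyze"),
  ("implement", "build"),
  ("improve", "optimize"),
  ("increase", "optimize"),
  ("insight", "data"),
  ("insights", "data"),
  ("interpret", "analyze"),
  ("investigate", "analyze"),
  ("kubernetes", "deployment"),
  ("latency", "performance"),
  ("launch", "build"),
  ("launched", "build"),
  ("lead", "lead"),
  ("learning", "models"),
  ("led", "lead"),
  ("machine", "models"),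
  ("maintain", "maintain"),
  ("manage", "lead"),
  ("manager", "stakeholders"),
  ("managers", "stakeholders"),
  ("measure", "analyze"),
  ("mentor", "lead"),
  ("ml", "models"),
  ("model", "architect"),
  ("models", "models"),
  ("monitor", "maintain"),
  ("nlp", "models"),
  ("operate", "maintain"),
  ("optimise", "optimize"),
  ("optimize", "optimize"),
  ("orchestrate", "deploy"),
  ("own", "lead"),
  ("owned", "lead"),
  ("partner", "collaborate"),
  ("partners", "stakeholders"),
  ("performance", "performance"),
  ("pipeline", "deployment"),
  ("pipelines", "pipelines"),
  ("plan", "architect"),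
  ("platform", "architecture"),
  ("postgres", "databases"),
  ("postgresql", "databases"),
  ("prediction", "models"),
  ("product", "stakeholders"),
  ("publish", "deploy"),
  ("qa", "test"),
  ("queries", "databases"),
  ("query", "databases"),
  ("reduce", "optimize"),
  ("release", "deploy"),
  ("reliability", "performance"),
  ("report", "dashboards"),
  ("reporting", "dashboards"),
  ("reports", "dashboards"),
  ("research", "analyze"),
  ("rest", "apis"),
  ("restful", "apis"),
  ("scalable", "architecture"),
  ("scale", "optimize"),
  ("schema", "databases"),
  ("script", "automate"),
  ("service", "apis"),
  ("services", "apis"),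
  ("ship", "build"),
  ("speed", "performance"),
  ("sql", "databases"),
  ("stakeholder", "stakeholders"),
  ("stakeholders", "stakeholders"),
  ("streamline", "automate"),
  ("support", "maintain"),
  ("system", "architecture"),
  ("systems", "architecture"),
  ("team", "stakeholders"),
  ("teams", "stakeholders"),
  ("test", "test"),
  ("throughput", "performance"),
  ("troubleshoot", "maintain"),
  ("tune", "optimize"),
  ("validate", "test"),
  ("verify", "test"),
  ("visualisation", "dashboards"),
  ("visualization", "dashboards"),
  ("work", "collaborate"),
  ("workflow", "pipelines"),
  ("workflows", "pipelines")]

-- the while-loop of Source B's binary search, as structural recursion on a fuel that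
-- bounds the number of iterations (hi - lo shrinks each step, so fuel = PAIRS.size suffices)
def bsearch (token : String) : Nat → Nat → Nat → Option String
  | 0, _, _ => none
  | fuel + 1, lo, hi =>
    if lo < hi then
      match PAIRS[(lo + hi) / 2]? with
      | none => none
      | some kv =>
        if kv.1 == token then some kv.2
        -- Python's 'key < token' on str = code-point lexicographic: PySem.Chars.strLt (exact)
        else if PySem.Chars.strLt kv.1.toList token.toList then bsearch token fuel ((lo + hi) / 2 + 1) hi
        else bsearch token fuel lo ((lo + hi) / 2)
    else none

def normalize_semantic_token_py_alt (token : String) : String :=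
  (bsearch token PAIRS.size 0 PAIRS.size).getD token

-- ===== PRECONDITION & SPEC =====
def Spec_normalize_semantic_token_py (token : String) (out : String) : Prop := out = normalize_semantic_token_py_alt token
instance (token : String) (out : String) : Decidable (Spec_normalize_semantic_token_py token out) := by unfold Spec_normalize_semantic_token_py; infer_instance

-- ===== CLAIM (what is proved, stated in full; the proofs are below) =====
def Claim_equal_normalize_semantic_token_py : Prop := ∀ (token : String), Dom_normalize_semantic_token_py token → Spec_normalize_semantic_token_py token (normalize_semantic_token_py token)

-- ===== LEMMAS AND PROOFS =====

-- all alias keys (= keys of PAIRS)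
def ALL_KEYS : List String := PAIRS.toList.map Prod.fst

-- binary search only ever answers from a pair whose key is the token
theorem bsearch_sound (token : String) (fuel : Nat) :
    ∀ lo hi v, bsearch token fuel lo hi = some v → token ∈ ALL_KEYS := by
  induction fuel with
  | zero => intro lo hi v h; exact absurd h (by simp [bsearch])
  | succ n ih =>
    intro lo hi v h
    rw [bsearch] at h
    by_cases hlt : lo < hi
    · rw [if_pos hlt] at h
      cases hm : PAIRS[(lo + hi) / 2]? with
      | none => rw [hm] at h; exact absurd h (by simp)
      | some kv =>
        rw [hm] at h
        dsimp only at h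
        split_ifs at h with heq hlts
        · have hk : kv.1 = token := by simpa using heq
          have hmem : kv ∈ PAIRS.toList := by
            have ht : PAIRS.toList[(lo + hi) / 2]? = some kv := by
              simpa [Array.getElem?_toList] using hm
            exact List.mem_of_getElem? ht
          exact hk ▸ List.mem_map.mpr ⟨kv, hmem, rfl⟩
        · exact ih ((lo + hi) / 2 + 1) hi v h
        · exact ih lo ((lo + hi) / 2) v h
    · rw [if_neg hlt] at h
      exact absurd h (by simp)

-- every alias appearing in A's tables is a key of PAIRS
theorem flat_subset_keys :
    ∀ t ∈ (ACTION_ALIASES ++ OBJECT_ALIASES).flatMap Prod.snd, t ∈ ALL_KEYS := by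
  decide

-- A and B agree on every key of PAIRS
theorem agree_on_keys :
    ALL_KEYS.all (fun t => normalize_semantic_token_py t == normalize_semantic_token_py_alt t) = true := by
  decide

-- off the key set, A falls through both scans
theorem a_default (token : String) (h : token ∉ ALL_KEYS) :
    normalize_semantic_token_py token = token := by
  have hn : ∀ (l : List (String × List String)),
      (∀ p ∈ l, p ∈ ACTION_ALIASES ++ OBJECT_ALIASES) →
      l.find? (fun p => p.2.contains token) = none := by
    intro l hl
    apply List.find?_eq_none.mpr
    intro p hp hc
    apply h
    apply flat_subset_keys
    exact List.mem_flatMap.mpr ⟨p, hl p hp, by simpa using hc⟩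
  unfold normalize_semantic_token_py
  rw [hn ACTION_ALIASES (fun p hp => List.mem_append_left _ hp),
      hn OBJECT_ALIASES (fun p hp => List.mem_append_right _ hp)]

-- ===== VERDICT (by name: the statement is the Claim_ definition above) =====
theorem normalize_semantic_token_py_spec : Claim_equal_normalize_semantic_token_py := by
  intro token _
  unfold Spec_normalize_semantic_token_py
  by_cases hk : token ∈ ALL_KEYS
  · exact eq_of_beq (List.all_eq_true.mp agree_on_keys token hk)
  · rw [a_default token hk]
    unfold normalize_semantic_token_py_alt
    cases hb : bsearch token PAIRS.size 0 PAIRS.size with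
    | none => rfl
    | some v => exact absurd (bsearch_sound token PAIRS.size 0 PAIRS.size v hb) hk
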